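-- pv_equiv track=rewrite | github.com/mkarroqe/root-rot | predict_commit.py | predict_commit_quality
-- ===== SOURCE A (Python) =====
-- def predict_commit_quality(commit_message, examples):
--     """
--     Predicts if a commit message is problematic based on keywords from examples.
--     This is a simple POC using basic keyword matching.
--     """
--     lower_message = commit_message.lower()
--
--     # Define keywords for problematic and unproblematic based on your examples
--     problematic_keywords = set()
--     unproblematic_keywords = set()
--
--     for example in examples:
--         msg = example.get("message", "").lower()
--         msg_type = example.get("type")
--
--         # For a simple POC, let's extract words from example messages
--         # and categorize them. This is very basic and would be improved
--         # with actual NLP techniques or more sophisticated rules.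
--         words = set(word.strip(".,!?;:\"'").lower() for word in msg.split() if len(word) > 2)
--
--         if msg_type == "problematic":
--             problematic_keywords.update(words)
--         elif msg_type == "unproblematic":
--             unproblematic_keywords.update(words)
--
--     # Check for problematic keywords in the commit message
--     for keyword in problematic_keywords:
--         if keyword in lower_message:
--             return "Problematic"
--
--     # For this POC, if no problematic keywords are found, we'll lean towards unproblematic.
--     # In a real scenario, you'd have more robust rules/models.
--     # You could also check for "unproblematic" keywords if you have strict conventions.
--     for keyword in unproblematic_keywords:
--         if keyword in lower_message:
--             # If it contains unproblematic keywords, and no problematic ones were caught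
--             return "Unproblematic"
--
--     # Default if no clear match (you might refine this)
--     if "fix" in lower_message or "update" in lower_message:
--          return "Potentially Problematic (needs review)" # Catches general short messages
--
--     return "Unproblematic" # Assume unproblematic if no specific problematic signs
-- ===== SOURCE B (Python) =====
-- def predict_commit_quality(commit_message, examples):
--     """Single pass over the examples with an early exit: no keyword sets are
--     built; each example's words are tested against the message directly."""
--     lower_message = commit_message.lower()
--
--     def matches(example):
--         words = example.get("message", "").lower().split()
--         return any(len(w) > 2 and w.strip(".,!?;:\"'").lower() in lower_message
--                    for w in words)
--
--     saw_unproblematic = False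
--     for example in examples:
--         msg_type = example.get("type")
--         if msg_type == "problematic":
--             if matches(example):
--                 return "Problematic"
--         elif msg_type == "unproblematic":
--             saw_unproblematic = saw_unproblematic or matches(example)
--
--     if saw_unproblematic:
--         return "Unproblematic"
--     if "fix" in lower_message or "update" in lower_message:
--         return "Potentially Problematic (needs review)"
--     return "Unproblematic"
-- ===== Notes on version B (the rewrite author's own statement) =====
-- stated objective: simpler
-- what changed: B makes a single pass over the examples, testing each example's words directly against the message with an early exit on the first problematic match, instead of first building two deduplicated keyword sets and then scanning them.
import Mathlib
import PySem

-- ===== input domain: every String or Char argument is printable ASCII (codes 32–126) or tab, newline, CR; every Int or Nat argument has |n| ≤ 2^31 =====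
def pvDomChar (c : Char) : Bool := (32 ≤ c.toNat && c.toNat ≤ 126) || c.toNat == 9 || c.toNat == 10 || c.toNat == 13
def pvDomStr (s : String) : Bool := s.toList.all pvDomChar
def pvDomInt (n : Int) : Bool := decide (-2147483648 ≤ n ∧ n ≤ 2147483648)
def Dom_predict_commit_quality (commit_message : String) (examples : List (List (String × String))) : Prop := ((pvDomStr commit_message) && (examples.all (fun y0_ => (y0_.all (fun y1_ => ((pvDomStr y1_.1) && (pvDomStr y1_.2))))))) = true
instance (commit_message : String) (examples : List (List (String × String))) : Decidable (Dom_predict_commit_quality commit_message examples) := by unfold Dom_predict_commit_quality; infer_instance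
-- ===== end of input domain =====

-- ===== PORT A =====
-- B is a single pass over the examples with direct word tests and early exit (no keyword sets built): simpler/alternative.
def pvPunct : String := ".,!?;:\"'"

-- set(word.strip(".,!?;:\"'").lower() for word in msg.split() if len(word) > 2), as the list before dedup
def pvWordsA (msg : String) : List String :=
  ((PySem.Str.split₀ msg).filter (fun w => decide (2 < PySem.Str.len w))).map
    (fun w => PySem.Str.lower (PySem.Str.stripChars w pvPunct))

def pvStepA (acc : PySem.Set String × PySem.Set String) (exm : List (String × String)) :
    PySem.Set String × PySem.Set String :=
  let msg := PySem.Str.lower (PySem.Dict.getD (PySem.Dict.mk exm) "message" "")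
  let msg_type := PySem.Dict.get? (PySem.Dict.mk exm) "type"
  let words := PySem.Set.ofList (pvWordsA msg)
  if msg_type = some "problematic" then (acc.1.update words, acc.2)
  else if msg_type = some "unproblematic" then (acc.1, acc.2.update words)
  else acc

def predict_commit_quality (commit_message : String) (examples : List (List (String × String))) : String :=
  let lower_message := PySem.Str.lower commit_message
  let sets := examples.foldl pvStepA (PySem.Set.empty, PySem.Set.empty)
  if sets.1.any (fun keyword => PySem.Str.isIn keyword lower_message) then "Problematic"
  else if sets.2.any (fun keyword => PySem.Str.isIn keyword lower_message) then "Unproblematic"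
  else if PySem.Str.isIn "fix" lower_message || PySem.Str.isIn "update" lower_message then
    "Potentially Problematic (needs review)"
  else "Unproblematic"

-- ===== PORT B =====
-- any(len(w) > 2 and w.strip(".,!?;:\"'").lower() in lower_message for w in example.get("message", "").lower().split())
def pvMatches (lower_message : String) (exm : List (String × String)) : Bool :=
  (PySem.Str.split₀ (PySem.Str.lower (PySem.Dict.getD (PySem.Dict.mk exm) "message" ""))).any
    (fun w => decide (2 < PySem.Str.len w) &&
      PySem.Str.isIn (PySem.Str.lower (PySem.Str.stripChars w pvPunct)) lower_message)

def pvLoopB (lower_message : String) : List (List (String × String)) → Bool → String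
  | [], saw_unproblematic =>
      if saw_unproblematic then "Unproblematic"
      else if PySem.Str.isIn "fix" lower_message || PySem.Str.isIn "update" lower_message then
        "Potentially Problematic (needs review)"
      else "Unproblematic"
  | exm :: rest, saw_unproblematic =>
      let msg_type := PySem.Dict.get? (PySem.Dict.mk exm) "type"
      if msg_type = some "problematic" then
        if pvMatches lower_message exm then "Problematic"
        else pvLoopB lower_message rest saw_unproblematic
      else if msg_type = some "unproblematic" then
        pvLoopB lower_message rest (saw_unproblematic || pvMatches lower_message exm)
      else pvLoopB lower_message rest saw_unproblematic

def predict_commit_quality_alt (commit_message : String) (examples : List (List (String × String))) : String :=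
  pvLoopB (PySem.Str.lower commit_message) examples false

-- ===== PRECONDITION & SPEC =====
def Spec_predict_commit_quality (commit_message : String) (examples : List (List (String × String))) (out : String) : Prop := out = predict_commit_quality_alt commit_message examples
instance (commit_message : String) (examples : List (List (String × String))) (out : String) : Decidable (Spec_predict_commit_quality commit_message examples out) := by unfold Spec_predict_commit_quality; infer_instance

-- ===== CLAIM (what is proved, stated in full; the proofs are below) =====
def Claim_equal_predict_commit_quality : Prop := ∀ (commit_message : String) (examples : List (List (String × String))), Dom_predict_commit_quality commit_message examples → Spec_predict_commit_quality commit_message examples (predict_commit_quality commit_message examples)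

-- ===== LEMMAS AND PROOFS =====

-- type and per-example keyword list, used only by the proofs
def pvType (exm : List (String × String)) : Option String :=
  PySem.Dict.get? (PySem.Dict.mk exm) "type"

def pvKw (exm : List (String × String)) : List String :=
  pvWordsA (PySem.Str.lower (PySem.Dict.getD (PySem.Dict.mk exm) "message" ""))

theorem pvStepA_fst (acc : PySem.Set String × PySem.Set String) (ex : List (String × String)) (y : String) :
    y ∈ (pvStepA acc ex).1 ↔ y ∈ acc.1 ∨ (pvType ex = some "problematic" ∧ y ∈ pvKw ex) := by
  unfold pvStepA pvType pvKw
  dsimp only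
  split_ifs with h1 h2 <;>
    simp_all [PySem.Set.mem_ofList]

theorem pvStepA_snd (acc : PySem.Set String × PySem.Set String) (ex : List (String × String)) (y : String) :
    y ∈ (pvStepA acc ex).2 ↔ y ∈ acc.2 ∨ (pvType ex = some "unproblematic" ∧ y ∈ pvKw ex) := by
  unfold pvStepA pvType pvKw
  dsimp only
  split_ifs with h1 h2 <;>
    simp_all [PySem.Set.mem_ofList]

theorem pv_fold_mem (exs : List (List (String × String))) (acc : PySem.Set String × PySem.Set String) (y : String) :
    (y ∈ (exs.foldl pvStepA acc).1 ↔ y ∈ acc.1 ∨ ∃ ex ∈ exs, pvType ex = some "problematic" ∧ y ∈ pvKw ex) ∧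
    (y ∈ (exs.foldl pvStepA acc).2 ↔ y ∈ acc.2 ∨ ∃ ex ∈ exs, pvType ex = some "unproblematic" ∧ y ∈ pvKw ex) := by
  induction exs generalizing acc with
  | nil => simp
  | cons ex rest ih =>
    have h := ih (pvStepA acc ex)
    constructor
    · rw [List.foldl_cons, h.1, pvStepA_fst]
      simp only [List.mem_cons]
      constructor
      · rintro ((hy | ⟨ht, hk⟩) | ⟨e, he, ht, hk⟩)
        · exact Or.inl hy
        · exact Or.inr ⟨ex, Or.inl rfl, ht, hk⟩
        · exact Or.inr ⟨e, Or.inr he, ht, hk⟩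
      · rintro (hy | ⟨e, (rfl | he), ht, hk⟩)
        · exact Or.inl (Or.inl hy)
        · exact Or.inl (Or.inr ⟨ht, hk⟩)
        · exact Or.inr ⟨e, he, ht, hk⟩
    · rw [List.foldl_cons, h.2, pvStepA_snd]
      simp only [List.mem_cons]
      constructor
      · rintro ((hy | ⟨ht, hk⟩) | ⟨e, he, ht, hk⟩)
        · exact Or.inl hy
        · exact Or.inr ⟨ex, Or.inl rfl, ht, hk⟩
        · exact Or.inr ⟨e, Or.inr he, ht, hk⟩
      · rintro (hy | ⟨e, (rfl | he), ht, hk⟩)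
        · exact Or.inl (Or.inl hy)
        · exact Or.inl (Or.inr ⟨ht, hk⟩)
        · exact Or.inr ⟨e, he, ht, hk⟩

theorem pv_matches_iff (lm : String) (ex : List (String × String)) :
    pvMatches lm ex = true ↔ ∃ kw ∈ pvKw ex, PySem.Str.isIn kw lm = true := by
  unfold pvMatches pvKw pvWordsA
  simp only [List.any_eq_true, List.mem_map, List.mem_filter, Bool.and_eq_true, decide_eq_true_eq]
  constructor
  · rintro ⟨w, hw, hlen, hin⟩
    exact ⟨_, ⟨w, ⟨hw, by simpa using hlen⟩, rfl⟩, hin⟩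
  · rintro ⟨kw, ⟨w, ⟨hw, hlen⟩, rfl⟩, hin⟩
    exact ⟨w, hw, by simpa using hlen, hin⟩

theorem pv_loopB_eq (lm : String) (exs : List (List (String × String))) (sawU : Bool) :
    pvLoopB lm exs sawU =
      if exs.any (fun ex => decide (pvType ex = some "problematic") && pvMatches lm ex) then "Problematic"
      else if sawU || exs.any (fun ex => decide (pvType ex = some "unproblematic") && pvMatches lm ex) then "Unproblematic"
      else if PySem.Str.isIn "fix" lm || PySem.Str.isIn "update" lm then
        "Potentially Problematic (needs review)"
      else "Unproblematic" := by
  induction exs generalizing sawU with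
  | nil => simp [pvLoopB]
  | cons ex rest ih =>
    simp only [pvLoopB, List.any_cons]
    by_cases h1 : PySem.Dict.get? (PySem.Dict.mk ex) "type" = some "problematic"
    · by_cases hm : pvMatches lm ex <;>
        simp [pvType, h1, hm, ih]
    · by_cases h2 : PySem.Dict.get? (PySem.Dict.mk ex) "type" = some "unproblematic"
      · by_cases hm : pvMatches lm ex <;>
          simp [pvType, h2, hm, ih]
      · simp [pvType, h1, h2, ih]

-- ===== VERDICT (by name: the statement is the Claim_ definition above) =====
theorem pv_anyP (lm : String) (exs : List (List (String × String))) :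
    ((exs.foldl pvStepA (PySem.Set.empty, PySem.Set.empty)).1.any
        (fun keyword => PySem.Str.isIn keyword lm))
      = exs.any (fun ex => decide (pvType ex = some "problematic") && pvMatches lm ex) := by
  rw [← Bool.coe_iff_coe]
  simp only [List.any_eq_true, Bool.and_eq_true, decide_eq_true_eq, pv_matches_iff]
  constructor
  · rintro ⟨kw, hmem, hin⟩
    rcases ((pv_fold_mem exs _ kw).1.mp hmem) with h | ⟨e, he, ht, hk⟩
    · simp [PySem.Set.empty] at h
    · exact ⟨e, he, ht, kw, hk, hin⟩
  · rintro ⟨e, he, ht, kw, hk, hin⟩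
    exact ⟨kw, (pv_fold_mem exs _ kw).1.mpr (Or.inr ⟨e, he, ht, hk⟩), hin⟩

theorem pv_anyU (lm : String) (exs : List (List (String × String))) :
    ((exs.foldl pvStepA (PySem.Set.empty, PySem.Set.empty)).2.any
        (fun keyword => PySem.Str.isIn keyword lm))
      = exs.any (fun ex => decide (pvType ex = some "unproblematic") && pvMatches lm ex) := by
  rw [← Bool.coe_iff_coe]
  simp only [List.any_eq_true, Bool.and_eq_true, decide_eq_true_eq, pv_matches_iff]
  constructor
  · rintro ⟨kw, hmem, hin⟩
    rcases ((pv_fold_mem exs _ kw).2.mp hmem) with h | ⟨e, he, ht, hk⟩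
    · simp [PySem.Set.empty] at h
    · exact ⟨e, he, ht, kw, hk, hin⟩
  · rintro ⟨e, he, ht, kw, hk, hin⟩
    exact ⟨kw, (pv_fold_mem exs _ kw).2.mpr (Or.inr ⟨e, he, ht, hk⟩), hin⟩

theorem predict_commit_quality_spec : Claim_equal_predict_commit_quality := by
  intro commit_message examples _
  unfold Spec_predict_commit_quality predict_commit_quality predict_commit_quality_alt
  rw [pv_loopB_eq, ← pv_anyP, ← pv_anyU]
  simp only [Bool.false_or]
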